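-- pv_equiv track=rewrite | github.com/douzujun/Python-Foundation-Suda | Exercise_postgraduate/python_project/python_suda/suda_practise/py05_encrypy.py | encrapy
-- ===== SOURCE A (Python) =====
-- def encrapy(str1, n, alpha):
--     alpha_low = alpha[0]      # 小写字母表
--     alpha_up = alpha[1]       # 大写字母表
--     length = len(str1)
--     res = ""
--
--     i = 0
--     while i < length:
--         num = ""
--         if str1[i].isupper():
--             res += alpha_up[(alpha_up.index(str1[i]) + n)%26]
--
--         elif str1[i].islower():
--             res += alpha_low[(alpha_low.index(str1[i]) + n)%26]
--
--         elif str1[i].isnumeric():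
--             num += str1[i]
--             i = i + 1
--             while i < length and str1[i].isnumeric():
--                 num += str1[i]
--                 i = i + 1
--             # 字符后退一个
--             i = i - 1
--             # 数字*n
--             res += str(int(num)*n)
--
--         i = i + 1
--
--     return res
-- ===== SOURCE B (Python) =====
-- def encrapy(str1, n, alpha):
--     alpha_low = alpha[0]
--     alpha_up = alpha[1]
--     # phase 1: tokenize into maximal numeric runs and single non-numeric characters
--     tokens = []
--     cur = ""
--     for c in str1:
--         if c.isnumeric():
--             cur += c
--         else:
--             if cur:
--                 tokens.append(cur)
--                 cur = ""
--             tokens.append(c)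
--     if cur:
--         tokens.append(cur)
--     # phase 2: translate each token independently
--     def tr(t):
--         c = t[0]
--         if c.isnumeric():
--             return str(int(t) * n)
--         if c.isupper():
--             return alpha_up[(alpha_up.index(c) + n) % 26]
--         if c.islower():
--             return alpha_low[(alpha_low.index(c) + n) % 26]
--         return ""
--     return "".join(tr(t) for t in tokens)
-- ===== Notes on version B (the rewrite author's own statement) =====
-- stated objective: alternative
-- what changed: Replaced A's index-juggling while-loop (with the nested numeric sub-loop and the i-1/i+1 dance) by a two-phase pipeline: first tokenize the string into maximal numeric runs and single non-numeric characters, then translate each token independently and join.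
import Mathlib
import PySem

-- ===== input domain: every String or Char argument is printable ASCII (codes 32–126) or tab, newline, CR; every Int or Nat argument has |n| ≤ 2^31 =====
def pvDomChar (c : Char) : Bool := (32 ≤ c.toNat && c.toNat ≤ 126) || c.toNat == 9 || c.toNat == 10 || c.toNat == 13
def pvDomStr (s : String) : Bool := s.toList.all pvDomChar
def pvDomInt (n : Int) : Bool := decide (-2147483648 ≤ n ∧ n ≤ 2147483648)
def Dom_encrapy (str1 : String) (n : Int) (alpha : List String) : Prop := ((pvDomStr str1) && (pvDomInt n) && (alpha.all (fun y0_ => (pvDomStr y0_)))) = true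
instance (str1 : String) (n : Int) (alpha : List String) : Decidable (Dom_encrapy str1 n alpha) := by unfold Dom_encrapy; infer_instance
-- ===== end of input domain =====

-- B re-implements A as a two-phase pipeline (tokenize into maximal numeric runs /
-- single characters, then translate each token and join) instead of A's single
-- index-driven while loop with a nested numeric sub-loop; same cost, clearer structure.

-- ===== PORT A =====
-- shared primitive: alpha_tab[(alpha_tab.index(c) + n) % 26] as a one-char piece
-- (both Pythons contain this very expression; out-of-range/missing cases are outside Pre_)
def pvShift (abc : List Char) (n : Int) (c : Char) : List Char :=
  [(PySem.List.pyGet? abc (PySem.Int.mod ((((PySem.List.index? abc c).getD 0 : Nat) : Int) + n) 26)).getD ' ']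

-- shared primitive: str(int(num)*n) (num is a run of digits; both Pythons contain it)
def pvNumPiece (num : List Char) (n : Int) : List Char :=
  (PySem.Int.toStr (((PySem.Int.ofChars? num).getD 0) * n)).toList

-- the inner 'while i < length and str1[i].isnumeric(): num += str1[i]; i += 1'
def encrapyInner (chars : List Char) (i : Nat) (num : List Char) : Nat × List Char :=
  if h : i < chars.length ∧ (chars.getD i ' ').isDigit then
    encrapyInner chars (i + 1) (num ++ [chars.getD i ' '])
  else (i, num)
termination_by chars.length - i
decreasing_by omega

theorem encrapyInner_fst_ge (chars : List Char) (i : Nat) (num : List Char) :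
    i ≤ (encrapyInner chars i num).1 := by
  fun_induction encrapyInner with
  | case1 i num h ih => omega
  | case2 => simp

-- the outer while loop of A (res accumulated as List Char)
def encrapyLoop (chars : List Char) (n : Int) (low up : List Char) (i : Nat) (res : List Char) : List Char :=
  if h : i < chars.length then
    let c := chars.getD i ' '
    if c.isUpper then encrapyLoop chars n low up (i + 1) (res ++ pvShift up n c)
    else if c.isLower then encrapyLoop chars n low up (i + 1) (res ++ pvShift low n c)
    else if c.isDigit then
      let p := encrapyInner chars (i + 1) [c]
      -- i = p.1 - 1 ("字符后退一个"), then i = i + 1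
      encrapyLoop chars n low up ((p.1 - 1) + 1) (res ++ pvNumPiece p.2 n)
    else encrapyLoop chars n low up (i + 1) res
  else res
termination_by chars.length - i
decreasing_by
  · omega
  · omega
  · have := encrapyInner_fst_ge chars (i + 1) [chars.getD i ' ']; omega
  · omega

def encrapy (str1 : String) (n : Int) (alpha : List String) : String :=
  let alpha_low := ((PySem.List.pyGet? alpha 0).getD "").toList
  let alpha_up := ((PySem.List.pyGet? alpha 1).getD "").toList
  String.mk (encrapyLoop str1.toList n alpha_low alpha_up 0 [])

-- ===== PORT B =====
-- phase 1: tokenize into maximal numeric runs and single non-numeric characters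
def encrapyTok (chars : List Char) (tokens : List (List Char)) (cur : List Char) : List (List Char) :=
  match chars with
  | [] => tokens ++ (if cur = [] then [] else [cur])
  | c :: rest =>
    if c.isDigit then encrapyTok rest tokens (cur ++ [c])
    else encrapyTok rest ((tokens ++ (if cur = [] then [] else [cur])) ++ [[c]]) []

-- phase 2: translate one token
def encrapyTr (n : Int) (low up : List Char) (t : List Char) : List Char :=
  match t with
  | [] => []  -- unreachable: tokens are never empty
  | c :: _ =>
    if c.isDigit then pvNumPiece t n
    else if c.isUpper then pvShift up n c
    else if c.isLower then pvShift low n c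
    else []

def encrapy_alt (str1 : String) (n : Int) (alpha : List String) : String :=
  let alpha_low := ((PySem.List.pyGet? alpha 0).getD "").toList
  let alpha_up := ((PySem.List.pyGet? alpha 1).getD "").toList
  String.mk (((encrapyTok str1.toList [] []).map (encrapyTr n alpha_low alpha_up)).flatten)

-- ===== PRECONDITION & SPEC =====
-- exactly the inputs on which Python A returns normally: alpha has both tables
-- (alpha[0]/alpha[1] would raise IndexError) and every letter of str1 occurs in its
-- table with the shifted position in range (otherwise .index raises ValueError or the
-- [..%26] lookup an IndexError)
def Pre_encrapy (str1 : String) (n : Int) (alpha : List String) : Prop :=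
  2 ≤ alpha.length ∧
  str1.toList.all (fun c =>
    (!c.isUpper || (((PySem.List.pyGet? alpha 1).getD "").toList.contains c &&
      decide ((PySem.Int.mod ((((PySem.List.index? (((PySem.List.pyGet? alpha 1).getD "").toList) c).getD 0 : Nat) : Int) + n) 26).toNat
        < (((PySem.List.pyGet? alpha 1).getD "").toList).length))) &&
    (!c.isLower || (((PySem.List.pyGet? alpha 0).getD "").toList.contains c &&
      decide ((PySem.Int.mod ((((PySem.List.index? (((PySem.List.pyGet? alpha 0).getD "").toList) c).getD 0 : Nat) : Int) + n) 26).toNat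
        < (((PySem.List.pyGet? alpha 0).getD "").toList).length)))) = true

instance (str1 : String) (n : Int) (alpha : List String) : Decidable (Pre_encrapy str1 n alpha) := by
  unfold Pre_encrapy; infer_instance

def pvWitness_encrapy : String × Int × List String :=
  ("aA 12b!", 1, ["abc", "ABC"])

def Spec_encrapy (str1 : String) (n : Int) (alpha : List String) (out : String) : Prop := out = encrapy_alt str1 n alpha
instance (str1 : String) (n : Int) (alpha : List String) (out : String) : Decidable (Spec_encrapy str1 n alpha out) := by unfold Spec_encrapy; infer_instance

-- ===== CLAIM (what is proved, stated in full; the proofs are below) =====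
def Claim_equal_encrapy : Prop := ∀ (str1 : String) (n : Int) (alpha : List String), Dom_encrapy str1 n alpha → Pre_encrapy str1 n alpha → Spec_encrapy str1 n alpha (encrapy str1 n alpha)

-- ===== LEMMAS AND PROOFS =====

-- reference function both ports are reduced to
def pvSpec (n : Int) (low up : List Char) : List Char → List Char
  | [] => []
  | c :: rest =>
    if c.isUpper then pvShift up n c ++ pvSpec n low up rest
    else if c.isLower then pvShift low n c ++ pvSpec n low up rest
    else if c.isDigit then
      pvNumPiece (c :: rest.takeWhile Char.isDigit) n ++ pvSpec n low up (rest.dropWhile Char.isDigit)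
    else pvSpec n low up rest
termination_by l => l.length
decreasing_by
  · simp
  · simp
  · have := List.length_dropWhile_le (p := Char.isDigit) (l := rest); simp; omega
  · simp

theorem digit_not_upper_lower (c : Char) (h : c.isDigit = true) :
    c.isUpper = false ∧ c.isLower = false := by
  simp only [Char.isDigit, Char.isUpper, Char.isLower, Bool.and_eq_true, decide_eq_true_eq,
    Bool.and_eq_false_iff, decide_eq_false_iff_not, ge_iff_le, UInt32.le_iff_toNat_le] at *
  have e0 : ('0'.val.toNat) = 48 := rfl
  have e9 : ('9'.val.toNat) = 57 := rfl
  have eA : ('A'.val.toNat) = 65 := rfl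
  have eZ : ('Z'.val.toNat) = 90 := rfl
  have ea : ('a'.val.toNat) = 97 := rfl
  exact ⟨by omega, by omega⟩

-- A side --------------------------------------------------------------------

theorem pv_dropWhile_eq_drop (p : Char → Bool) (l : List Char) :
    l.dropWhile p = l.drop (l.takeWhile p).length := by
  induction l with
  | nil => rfl
  | cons a l ih =>
    by_cases h : p a <;> simp [List.dropWhile_cons, List.takeWhile_cons, h, ih]

theorem getD_cons_drop (chars : List Char) (i : Nat) (h : i < chars.length) :
    chars.drop i = chars.getD i ' ' :: chars.drop (i + 1) := by
  have h1 : chars.getD i ' ' = chars[i] := by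
    rw [List.getD_eq_getElem?_getD, List.getElem?_eq_getElem h]
    rfl
  rw [h1]
  exact List.drop_eq_getElem_cons h

theorem encrapyInner_spec (chars : List Char) (i : Nat) (num : List Char) :
    encrapyInner chars i num =
      (i + ((chars.drop i).takeWhile Char.isDigit).length,
       num ++ (chars.drop i).takeWhile Char.isDigit) := by
  fun_induction encrapyInner with
  | case1 i num h ih =>
    obtain ⟨hlt, hdig⟩ := h
    rw [ih, getD_cons_drop chars i hlt, List.takeWhile_cons_of_pos hdig]
    simp only [Prod.mk.injEq, List.length_cons, List.append_assoc, List.cons_append,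
      List.nil_append]
    exact ⟨by omega, trivial⟩
  | case2 i num h =>
    rcases Nat.lt_or_ge i chars.length with hlt | hge
    · have hdig : (chars.getD i ' ').isDigit = false := by
        by_contra hh; simp only [Bool.not_eq_false] at hh; exact h ⟨hlt, hh⟩
      rw [getD_cons_drop chars i hlt,
        List.takeWhile_cons_of_neg (by simp only [Bool.not_eq_true]; exact hdig)]
      simp
    · rw [List.drop_eq_nil_of_le hge]; simp

theorem encrapyLoop_spec (chars : List Char) (n : Int) (low up : List Char)
    (i : Nat) (res : List Char) :
    encrapyLoop chars n low up i res = res ++ pvSpec n low up (chars.drop i) := by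
  fun_induction encrapyLoop with
  | case1 i res h c hup ih =>
    have hup' : (chars.getD i ' ').isUpper = true := hup
    rw [ih, getD_cons_drop chars i h, pvSpec, if_pos hup', List.append_assoc]
  | case2 i res h c hup hlow ih =>
    have hup' : (chars.getD i ' ').isUpper = false := by
      simp only [Bool.not_eq_true] at hup; exact hup
    have hlow' : (chars.getD i ' ').isLower = true := hlow
    rw [ih, getD_cons_drop chars i h, pvSpec, if_neg (by simp only [Bool.not_eq_true]; exact hup'), if_pos hlow',
      List.append_assoc]
  | case3 i res h c hup hlow hdig p ih =>
    have hup' : (chars.getD i ' ').isUpper = false := by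
      simp only [Bool.not_eq_true] at hup; exact hup
    have hlow' : (chars.getD i ' ').isLower = false := by
      simp only [Bool.not_eq_true] at hlow; exact hlow
    have hdig' : (chars.getD i ' ').isDigit = true := hdig
    have hp : p = (i + 1 + ((chars.drop (i + 1)).takeWhile Char.isDigit).length,
        [c] ++ (chars.drop (i + 1)).takeWhile Char.isDigit) := encrapyInner_spec _ _ _
    have hge : i + 1 ≤ p.1 := encrapyInner_fst_ge chars (i + 1) [c]
    have h1 : p.1 - 1 + 1 = p.1 := by omega
    have hdropP : chars.drop p.1 = (chars.drop (i + 1)).dropWhile Char.isDigit := by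
      rw [pv_dropWhile_eq_drop, List.drop_drop]
      simp only [hp]
      try congr 1
      try omega
    have hnum : p.2 = (chars.getD i ' ') :: (chars.drop (i + 1)).takeWhile Char.isDigit := by
      rw [hp]
      rfl
    rw [ih, h1, hdropP, getD_cons_drop chars i h, pvSpec, if_neg (by simp only [Bool.not_eq_true]; exact hup'),
      if_neg (by simp only [Bool.not_eq_true]; exact hlow'), if_pos hdig', hnum, List.append_assoc]
  | case4 i res h c hup hlow hdig ih =>
    have hup' : (chars.getD i ' ').isUpper = false := by
      simp only [Bool.not_eq_true] at hup; exact hup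
    have hlow' : (chars.getD i ' ').isLower = false := by
      simp only [Bool.not_eq_true] at hlow; exact hlow
    have hdig' : (chars.getD i ' ').isDigit = false := by
      simp only [Bool.not_eq_true] at hdig; exact hdig
    rw [ih, getD_cons_drop chars i h, pvSpec, if_neg (by simp only [Bool.not_eq_true]; exact hup'),
      if_neg (by simp only [Bool.not_eq_true]; exact hlow'), if_neg (by simp only [Bool.not_eq_true]; exact hdig')]
  | case5 i res h =>
    rw [List.drop_eq_nil_of_le (by omega)]
    simp [pvSpec]

-- B side --------------------------------------------------------------------

theorem takeWhile_digits_append {ds : List Char} (hds : ∀ d ∈ ds, d.isDigit = true)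
    {c : Char} (hc : c.isDigit = false) (rest : List Char) :
    (ds ++ c :: rest).takeWhile Char.isDigit = ds ∧
    (ds ++ c :: rest).dropWhile Char.isDigit = c :: rest := by
  induction ds with
  | nil => simp [List.takeWhile_cons, List.dropWhile_cons, hc]
  | cons d ds ih =>
    have hd : d.isDigit = true := hds d (by simp)
    have := ih (fun x hx => hds x (by simp [hx]))
    simp [List.takeWhile_cons, List.dropWhile_cons, hd, this]

theorem pvSpec_digits_prefix (n : Int) (low up : List Char) {ds : List Char}
    (hne : ds ≠ []) (hds : ∀ d ∈ ds, d.isDigit = true) {c : Char} (hc : c.isDigit = false)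
    (rest : List Char) :
    pvSpec n low up (ds ++ c :: rest) = pvNumPiece ds n ++ pvSpec n low up (c :: rest) := by
  obtain ⟨d, ds', rfl⟩ : ∃ d ds', ds = d :: ds' := by
    cases ds with
    | nil => exact absurd rfl hne
    | cons d ds' => exact ⟨d, ds', rfl⟩
  have hd : d.isDigit = true := hds d (by simp)
  obtain ⟨hnu, hnl⟩ := digit_not_upper_lower d hd
  have htw := takeWhile_digits_append (ds := ds') (fun x hx => hds x (by simp [hx])) hc rest
  rw [List.cons_append, pvSpec]
  simp [hnu, hnl, hd, htw.1, htw.2]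

theorem pvSpec_digits_only (n : Int) (low up : List Char) {ds : List Char}
    (hds : ∀ d ∈ ds, d.isDigit = true) (hne : ds ≠ []) :
    pvSpec n low up ds = pvNumPiece ds n := by
  obtain ⟨d, ds', rfl⟩ : ∃ d ds', ds = d :: ds' := by
    cases ds with
    | nil => exact absurd rfl hne
    | cons d ds' => exact ⟨d, ds', rfl⟩
  have hd : d.isDigit = true := hds d (by simp)
  obtain ⟨hnu, hnl⟩ := digit_not_upper_lower d hd
  have h1 : ds'.takeWhile Char.isDigit = ds' :=
    List.takeWhile_eq_self_iff.2 (fun x hx => hds x (by simp [hx]))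
  have h2 : ds'.dropWhile Char.isDigit = [] :=
    List.dropWhile_eq_nil_iff.2 (fun x hx => hds x (by simp [hx]))
  rw [pvSpec]
  simp [hnu, hnl, hd, h1, h2, pvSpec]

theorem encrapyTok_spec (n : Int) (low up : List Char) (s : List Char)
    (tokens : List (List Char)) (cur : List Char) (hcur : ∀ d ∈ cur, d.isDigit = true) :
    ((encrapyTok s tokens cur).map (encrapyTr n low up)).flatten =
      (tokens.map (encrapyTr n low up)).flatten ++ pvSpec n low up (cur ++ s) := by
  induction s generalizing tokens cur with
  | nil =>
    rw [encrapyTok]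
    by_cases hc : cur = []
    · simp [hc, pvSpec]
    · have : encrapyTr n low up cur = pvNumPiece cur n := by
        obtain ⟨d, ds', rfl⟩ : ∃ d ds', cur = d :: ds' := by
          cases cur with
          | nil => exact absurd rfl hc
          | cons d ds' => exact ⟨d, ds', rfl⟩
        simp [encrapyTr, hcur d (by simp)]
      simp [hc, this, pvSpec_digits_only n low up hcur hc]
  | cons c rest ih =>
    rw [encrapyTok]
    by_cases hd : c.isDigit
    · rw [if_pos hd]
      rw [ih _ (cur ++ [c]) (by intro x hx; rcases List.mem_append.1 hx with h | h
                                exacts [hcur x h, by simp at h; simp [h, hd]])]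
      simp
    · rw [if_neg hd]
      rw [ih _ [] (by simp)]
      by_cases hc : cur = []
      · subst hc
        simp only [List.nil_append]
        rw [pvSpec]
        simp only [List.map_append, List.flatten_append, List.append_nil, List.map_cons,
          List.map_nil, List.flatten_cons, List.flatten_nil]
        have : encrapyTr n low up [c] =
            (if c.isUpper then pvShift up n c
             else if c.isLower then pvShift low n c else []) := by
          simp [encrapyTr, hd]
        rw [this]
        by_cases hu : c.isUpper <;> by_cases hl : c.isLower <;>
          simp [hu, hl, hd, List.append_assoc]
      · rw [pvSpec_digits_prefix n low up hc hcur (by simpa using hd) rest]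
        rw [pvSpec]
        simp only [List.map_append, List.flatten_append, List.map_cons, List.map_nil,
          List.flatten_cons, List.flatten_nil, if_neg hc, List.map_cons, List.flatten_cons]
        have htrc : encrapyTr n low up cur = pvNumPiece cur n := by
          obtain ⟨d, ds', rfl⟩ : ∃ d ds', cur = d :: ds' := by
            cases cur with
            | nil => exact absurd rfl hc
            | cons d ds' => exact ⟨d, ds', rfl⟩
          simp [encrapyTr, hcur d (by simp)]
        have htr1 : encrapyTr n low up [c] =
            (if c.isUpper then pvShift up n c
             else if c.isLower then pvShift low n c else []) := by
          simp [encrapyTr, hd]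
        rw [htrc, htr1]
        by_cases hu : c.isUpper <;> by_cases hl : c.isLower <;>
          simp [hu, hl, hd, List.append_assoc]

-- ===== VERDICT (by name: the statement is the Claim_ definition above) =====
theorem encrapy_spec : Claim_equal_encrapy := by
  intro str1 n alpha _ _
  unfold Spec_encrapy encrapy encrapy_alt
  dsimp only
  rw [encrapyLoop_spec, encrapyTok_spec _ _ _ _ _ _ (by simp)]
  simp
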